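-- pv_equiv track=rewrite | github.com/Navin-S-R/frappe_profiler | frappe_profiler/analyzers/base.py | is_profiler_own_query
-- ===== SOURCE A (Python) =====
-- def is_profiler_own_query(stack: list | None) -> bool:
-- 	"""Return True if a SQL call's Python stack originates from the
-- 	profiler's own instrumentation.
--
-- 	Examples of queries that hit this path:
--
-- 	- ``frappe_profiler/infra_capture.py:176`` — the ``SHOW GLOBAL
-- 	  STATUS`` snapshot run inside every ``before_request`` /
-- 	  ``after_request`` hook. Fired ~2× per captured request.
-- 	- ``frappe_profiler/infra_capture.py`` — the one-shot ``SHOW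
-- 	  VARIABLES`` for ``max_connections`` (cached after first call).
-- 	- Anything else the profiler queries as part of its own bookkeeping.
--
-- 	These queries are real SQL that MariaDB executed, so they show up
-- 	in the recorder's call list with stack traces. The user can't act
-- 	on them, though — they're profiler overhead, not application work.
-- 	Before this helper, n_plus_one would surface them as:
--
-- 	    "Same query ran 22× at frappe_profiler/infra_capture.py:176"
--
-- 	and top_queries would include them in the slow-queries leaderboard,
-- 	both with the profiler's own internal file path as the "blame
-- 	frame." Filtering them out here keeps the findings user-actionable.
--
-- 	The rule (walk innermost → outermost):
--
-- 	- If we find a user frame (not in ``frappe/`` and not in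
-- 	  ``frappe_profiler/``) → return False. The query came from user
-- 	  code routed through framework helpers — keep it.
-- 	- If we exhaust the stack seeing only ``frappe/`` and
-- 	  ``frappe_profiler/`` frames AND at least one was
-- 	  ``frappe_profiler/`` → return True. The deepest non-frappe frame
-- 	  is inside the profiler, so the query originated there.
-- 	- If we exhaust with only ``frappe/`` frames → return False. This
-- 	  is a legitimate framework query (migration, fixture, internal
-- 	  bg task) — the ``walk_callsite`` fallback still surfaces it.
-- 	"""
-- 	if not stack:
-- 		return False
-- 	has_profiler_frame = False
-- 	for frame in reversed(stack):
-- 		if not isinstance(frame, dict):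
-- 			continue
-- 		filename = (frame.get("filename") or "").replace("\\", "/")
-- 		if not filename:
-- 			continue
-- 		# v0.5.1: substring (not startswith) so we match bench-relative
-- 		# paths like ``apps/frappe_profiler/frappe_profiler/capture.py``
-- 		# and absolute paths like ``/Users/.../apps/frappe_profiler/...``
-- 		# in addition to pyinstrument's ``frappe_profiler/capture.py``
-- 		# short form. startswith missed both the bench and absolute
-- 		# shapes, letting profiler frames slip through to be blamed
-- 		# as Framework N+1 findings.
-- 		if "frappe_profiler/" in filename:
-- 			has_profiler_frame = True
-- 			continue
-- 		if "frappe/" in filename: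
-- 			# Keep walking — the profiler or user code may be further out.
-- 			continue
-- 		# Non-framework frame — this is user code; the query's origin
-- 		# is the user's business logic, not our instrumentation.
-- 		return False
-- 	return has_profiler_frame
-- ===== SOURCE B (Python) =====
-- def is_profiler_own_query(stack: list | None) -> bool:
--     if not stack:
--         return False
--     names = [n for n in ((frame.get("filename") or "").replace("\\", "/")
--                          for frame in stack if isinstance(frame, dict)) if n]
--     if any("frappe_profiler/" not in n and "frappe/" not in n for n in names):
--         return False
--     return any("frappe_profiler/" in n for n in names)
-- ===== Notes on version B (the rewrite author's own statement) =====
-- stated objective: simpler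
-- what changed: Replaces the reversed, early-returning, stateful-flag scan with order-independent whole-list membership predicates: collect the normalized non-empty filenames once, return False if any is a user frame, else True iff any contains 'frappe_profiler/'.
import Mathlib
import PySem

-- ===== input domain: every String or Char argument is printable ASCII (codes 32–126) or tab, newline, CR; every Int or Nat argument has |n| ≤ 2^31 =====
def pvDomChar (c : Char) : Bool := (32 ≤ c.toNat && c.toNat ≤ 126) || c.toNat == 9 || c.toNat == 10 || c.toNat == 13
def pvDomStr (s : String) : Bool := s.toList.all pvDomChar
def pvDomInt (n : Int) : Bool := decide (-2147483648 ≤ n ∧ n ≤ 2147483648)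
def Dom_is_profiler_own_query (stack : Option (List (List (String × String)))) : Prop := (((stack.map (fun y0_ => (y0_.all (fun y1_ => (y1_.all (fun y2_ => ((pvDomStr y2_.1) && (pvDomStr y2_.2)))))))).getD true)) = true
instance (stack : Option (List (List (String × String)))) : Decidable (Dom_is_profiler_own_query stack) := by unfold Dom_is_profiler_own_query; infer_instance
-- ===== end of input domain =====

-- B replaces A's reversed, early-returning, stateful-flag scan by order-independent
-- membership predicates over the normalized filename list (objective: simpler).

-- shared normalization step, '(frame.get("filename") or "").replace("\\", "/")'
-- ('or ""' coincides with the default "" since an empty value normalizes to ""):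
def pvFilename (frame : List (String × String)) : String :=
  PySem.Str.replace (PySem.Dict.getD (PySem.Dict.mk frame) "filename" "") "\\" "/"

-- ===== PORT A =====
-- A's loop over reversed(stack) with the has_profiler_frame flag; early return False on a
-- user frame. (Python's 'isinstance(frame, dict)' guard is always true under the type
-- convention — every frame IS a dict — so it has no Lean counterpart.)
def pvALoop : List (List (String × String)) → Bool → Bool
  | [], flag => flag
  | frame :: rest, flag =>
    let filename := pvFilename frame
    if filename = "" then pvALoop rest flag
    else if PySem.Str.isIn "frappe_profiler/" filename then pvALoop rest true
    else if PySem.Str.isIn "frappe/" filename then pvALoop rest flag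
    else false

def is_profiler_own_query (stack : Option (List (List (String × String)))) : Bool :=
  match stack with
  | none => false
  | some st => if st = [] then false else pvALoop st.reverse false

-- ===== PORT B =====
def is_profiler_own_query_alt (stack : Option (List (List (String × String)))) : Bool :=
  match stack with
  | none => false
  | some st =>
    if st = [] then false else
    let names := (st.map pvFilename).filter (fun n => n ≠ "")
    if names.any (fun n => !PySem.Str.isIn "frappe_profiler/" n && !PySem.Str.isIn "frappe/" n)
    then false
    else names.any (fun n => PySem.Str.isIn "frappe_profiler/" n)

-- ===== PRECONDITION & SPEC =====
def Spec_is_profiler_own_query (stack : Option (List (List (String × String)))) (out : Bool) : Prop := out = is_profiler_own_query_alt stack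
instance (stack : Option (List (List (String × String)))) (out : Bool) : Decidable (Spec_is_profiler_own_query stack out) := by unfold Spec_is_profiler_own_query; infer_instance

-- ===== CLAIM (what is proved, stated in full; the proofs are below) =====
def Claim_equal_is_profiler_own_query : Prop := ∀ (stack : Option (List (List (String × String)))), Dom_is_profiler_own_query stack → Spec_is_profiler_own_query stack (is_profiler_own_query stack)

-- ===== LEMMAS AND PROOFS =====

-- classification predicates on a frame (proof-only helpers)
def pvUser (fr : List (String × String)) : Bool :=
  pvFilename fr ≠ "" && (!PySem.Str.isIn "frappe_profiler/" (pvFilename fr) && !PySem.Str.isIn "frappe/" (pvFilename fr))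

def pvProf (fr : List (String × String)) : Bool :=
  pvFilename fr ≠ "" && PySem.Str.isIn "frappe_profiler/" (pvFilename fr)

-- A's loop characterised order-independently
theorem pvALoop_eq (l : List (List (String × String))) (flag : Bool) :
    pvALoop l flag = if l.any pvUser then false else (flag || l.any pvProf) := by
  induction l generalizing flag with
  | nil => simp [pvALoop]
  | cons fr rest ih =>
    simp only [pvALoop, List.any_cons]
    by_cases h0 : pvFilename fr = ""
    · have hu : pvUser fr = false := by simp [pvUser, h0]
      have hp : pvProf fr = false := by simp [pvProf, h0]
      rw [if_pos h0, ih, hu, hp]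
      simp
    · by_cases h1 : PySem.Str.isIn "frappe_profiler/" (pvFilename fr) = true
      · have hu : pvUser fr = false := by simp only [pvUser, h1, Bool.not_true, Bool.false_and, Bool.and_false]
        have hp : pvProf fr = true := by simp only [pvProf, h1, Bool.and_true, decide_eq_true (show pvFilename fr ≠ "" from h0)]
        rw [if_neg h0, if_pos h1, ih, hu, hp]
        by_cases hr : rest.any pvUser = true <;> simp [hr]
      · by_cases h2 : PySem.Str.isIn "frappe/" (pvFilename fr) = true
        · have hu : pvUser fr = false := by
            simp only [pvUser, h2, Bool.not_true, Bool.and_false]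
          have hp : pvProf fr = false := by
            simp only [pvProf, Bool.eq_false_iff]
            intro h; exact h1 (by simpa using (Bool.and_elim_right h))
          rw [if_neg h0, if_neg h1, if_pos h2, ih, hu, hp]
          simp
        · have hu : pvUser fr = true := by
            simp only [Bool.not_eq_true] at h1 h2
            simp at h1 h2
            simp [pvUser, h0, h1, h2]
          rw [if_neg h0, if_neg h1, if_neg h2, hu]
          simp

-- ===== VERDICT (by name: the statement is the Claim_ definition above) =====
theorem is_profiler_own_query_spec : Claim_equal_is_profiler_own_query := by
  intro stack _
  unfold Spec_is_profiler_own_query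
  cases stack with
  | none => rfl
  | some st =>
    simp only [is_profiler_own_query, is_profiler_own_query_alt]
    by_cases hst : st = []
    · simp [hst]
    · rw [if_neg hst, if_neg hst, pvALoop_eq, List.any_reverse, List.any_reverse]
      have hU : ((st.map pvFilename).filter (fun n => n ≠ "")).any
            (fun n => !PySem.Str.isIn "frappe_profiler/" n && !PySem.Str.isIn "frappe/" n)
          = st.any pvUser := by
        simp [List.any_filter, List.any_map]
        congr 1; funext fr; simp [Function.comp, pvUser]
      have hP : ((st.map pvFilename).filter (fun n => n ≠ "")).any
            (fun n => PySem.Str.isIn "frappe_profiler/" n)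
          = st.any pvProf := by
        simp [List.any_filter, List.any_map]
        congr 1; funext fr; simp [Function.comp, pvProf]
      simp only [hU, hP, Bool.false_or]
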